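-- pv_equiv track=rewrite | github.com/welbsterhansi/purge-acr-openshifit | purge.py | compute_repo_counts
-- ===== SOURCE A (Python) =====
-- CLUSTER_REASONS = ("running_on_cluster", "in_imagestream_history")
--
-- def compute_repo_counts(images):
--     """Return (manifests, candidates, cluster, protected, action) for a list of images.
--
--     - manifests  : total manifests in the repository
--     - candidates : images that were deletion candidates (would_delete + cluster)
--     - cluster    : images protected because they are active on the cluster
--     - protected  : images protected by other rules (keep, too_recent, no_tag, …)
--     - action     : images that will be / were deleted (would_delete / deleted)
--     """
--     manifests  = len(images)
--     candidates = len([i for i in images if i.get("canDelete") or i.get("deleted") or i.get("protectionReason") in CLUSTER_REASONS])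
--     cluster    = len([i for i in images if i.get("protectionReason") in CLUSTER_REASONS])
--     protected  = len([
--         i for i in images
--         if not i.get("canDelete") and not i.get("deleted")
--         and i.get("protectionReason") not in CLUSTER_REASONS
--         and i.get("protectionReason") is not None
--     ])
--     action     = len([i for i in images if i.get("canDelete") or i.get("deleted")])
--     return manifests, candidates, cluster, protected, action
-- ===== SOURCE B (Python) =====
-- CLUSTER_REASONS = ("running_on_cluster", "in_imagestream_history")
--
-- def compute_repo_counts(images):
--     """One pass over images with integer accumulators instead of four filtering passes (same cost, different structure)."""
--     manifests = candidates = cluster = protected = action = 0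
--     for i in images:
--         manifests += 1
--         cd = i.get("canDelete")
--         dl = i.get("deleted")
--         pr = i.get("protectionReason")
--         on_cluster = pr in CLUSTER_REASONS
--         act = bool(cd) or bool(dl)
--         if act or on_cluster:
--             candidates += 1
--         if on_cluster:
--             cluster += 1
--         if act:
--             action += 1
--         elif not on_cluster and pr is not None:
--             protected += 1
--     return manifests, candidates, cluster, protected, action
-- ===== Notes on version B (the rewrite author's own statement) =====
-- stated objective: alternative
-- what changed: Replaced four separate list-comprehension passes (each re-doing the dict lookups) with a single loop that reads canDelete/deleted/protectionReason once per image and bumps five integer accumulators.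
import Mathlib
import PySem

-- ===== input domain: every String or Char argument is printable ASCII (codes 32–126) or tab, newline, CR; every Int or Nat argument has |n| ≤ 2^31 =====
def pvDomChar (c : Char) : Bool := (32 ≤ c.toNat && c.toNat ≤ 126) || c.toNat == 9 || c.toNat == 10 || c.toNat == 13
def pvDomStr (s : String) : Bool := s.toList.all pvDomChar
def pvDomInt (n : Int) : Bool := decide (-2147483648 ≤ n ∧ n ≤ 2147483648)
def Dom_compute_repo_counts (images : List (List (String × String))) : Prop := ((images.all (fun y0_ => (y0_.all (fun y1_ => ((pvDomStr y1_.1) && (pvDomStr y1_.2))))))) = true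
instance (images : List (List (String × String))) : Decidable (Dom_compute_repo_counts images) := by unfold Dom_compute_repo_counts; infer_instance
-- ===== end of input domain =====

-- B replaces A's four filtering passes with one fold carrying five integer accumulators.
-- ===== PORT A =====
-- i.get(k): first-match lookup in the association list (Python dict.get)
def pvGet (i : List (String × String)) (k : String) : Option String :=
  (PySem.Dict.mk i).get? k

-- Python truthiness of i.get(k): None and "" are falsy
def pvTruthy (o : Option String) : Bool :=
  match o with
  | none => false
  | some s => !(s == "")

-- `pr in CLUSTER_REASONS` (None is not in the tuple)
def pvInCluster (o : Option String) : Bool :=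
  match o with
  | none => false
  | some s => s == "running_on_cluster" || s == "in_imagestream_history"

def compute_repo_counts (images : List (List (String × String))) : Int × Int × Int × Int × Int :=
  let manifests : Int := images.length
  let candidates : Int := (images.filter (fun i =>
    pvTruthy (pvGet i "canDelete") || pvTruthy (pvGet i "deleted") || pvInCluster (pvGet i "protectionReason"))).length
  let cluster : Int := (images.filter (fun i => pvInCluster (pvGet i "protectionReason"))).length
  let protected_ : Int := (images.filter (fun i =>
    !pvTruthy (pvGet i "canDelete") && !pvTruthy (pvGet i "deleted")
    && !pvInCluster (pvGet i "protectionReason") && (pvGet i "protectionReason").isSome)).length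
  let action : Int := (images.filter (fun i =>
    pvTruthy (pvGet i "canDelete") || pvTruthy (pvGet i "deleted"))).length
  (manifests, candidates, cluster, protected_, action)

-- ===== PORT B =====
def pvStep (s : Int × Int × Int × Int × Int) (i : List (String × String)) :
    Int × Int × Int × Int × Int :=
  let cd := pvGet i "canDelete"
  let dl := pvGet i "deleted"
  let pr := pvGet i "protectionReason"
  let onCluster := pvInCluster pr
  let act := pvTruthy cd || pvTruthy dl
  (s.1 + 1,
   if act || onCluster then s.2.1 + 1 else s.2.1,
   if onCluster then s.2.2.1 + 1 else s.2.2.1,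
   if act then s.2.2.2.1 else if !onCluster && pr.isSome then s.2.2.2.1 + 1 else s.2.2.2.1,
   if act then s.2.2.2.2 + 1 else s.2.2.2.2)

def compute_repo_counts_alt (images : List (List (String × String))) : Int × Int × Int × Int × Int :=
  images.foldl pvStep (0, 0, 0, 0, 0)

-- ===== PRECONDITION & SPEC =====
def Spec_compute_repo_counts (images : List (List (String × String))) (out : Int × Int × Int × Int × Int) : Prop := out = compute_repo_counts_alt images
instance (images : List (List (String × String))) (out : Int × Int × Int × Int × Int) : Decidable (Spec_compute_repo_counts images out) := by unfold Spec_compute_repo_counts; infer_instance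

-- ===== CLAIM (what is proved, stated in full; the proofs are below) =====
def Claim_equal_compute_repo_counts : Prop := ∀ (images : List (List (String × String))), Dom_compute_repo_counts images → Spec_compute_repo_counts images (compute_repo_counts images)

-- ===== LEMMAS AND PROOFS =====

theorem pvFold_eq (images : List (List (String × String))) (m c cl p ac : Int) :
    images.foldl pvStep (m, c, cl, p, ac) =
      (m + (compute_repo_counts images).1,
       c + (compute_repo_counts images).2.1,
       cl + (compute_repo_counts images).2.2.1,
       p + (compute_repo_counts images).2.2.2.1,
       ac + (compute_repo_counts images).2.2.2.2) := by
  induction images generalizing m c cl p ac with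
  | nil => simp [compute_repo_counts]
  | cons i t ih =>
    simp only [List.foldl, ih, compute_repo_counts, pvStep, List.filter, List.length_cons]
    by_cases hcd : pvTruthy (pvGet i "canDelete") <;>
    by_cases hdl : pvTruthy (pvGet i "deleted") <;>
    by_cases hcl : pvInCluster (pvGet i "protectionReason") <;>
    by_cases hs : (pvGet i "protectionReason").isSome <;>
      simp [hcd, hdl, hcl, hs, Prod.ext_iff] <;> omega

-- ===== VERDICT (by name: the statement is the Claim_ definition above) =====
theorem compute_repo_counts_spec : Claim_equal_compute_repo_counts := by
  intro images _
  unfold Spec_compute_repo_counts compute_repo_counts_alt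
  rw [pvFold_eq]
  simp
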